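-- pv_equiv track=rewrite | github.com/akashhebbar/Leetcode | A2Z/Basicmaths/count_digits.py | get_count_digit
-- ===== SOURCE A (Python) =====
-- def get_count_digit(num: int) -> tuple:
--     count = 0
--     rev = ""
--     while num > 0:
--         last = num % 10
--         rev += str(last)
--         count = count + 1
--         num = num // 10
--     return count, rev
-- ===== SOURCE B (Python) =====
-- def get_count_digit(num: int) -> tuple:
--     s = str(num) if num > 0 else ""
--     return len(s), s[::-1]
-- ===== Notes on version B (the rewrite author's own statement) =====
-- stated objective: idiomatic
-- what changed: Replaces the modulo/floor-division digit-extraction loop with a single str() conversion, len() and a reversing slice.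
import Mathlib
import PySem

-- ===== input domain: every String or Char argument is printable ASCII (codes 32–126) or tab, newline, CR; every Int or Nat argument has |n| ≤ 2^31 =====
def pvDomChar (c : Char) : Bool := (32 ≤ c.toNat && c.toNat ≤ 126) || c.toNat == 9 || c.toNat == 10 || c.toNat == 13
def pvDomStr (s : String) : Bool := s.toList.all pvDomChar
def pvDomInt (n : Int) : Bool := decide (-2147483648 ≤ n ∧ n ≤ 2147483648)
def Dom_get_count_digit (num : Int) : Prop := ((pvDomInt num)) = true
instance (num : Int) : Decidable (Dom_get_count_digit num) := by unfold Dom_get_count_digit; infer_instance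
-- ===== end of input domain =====

-- B replaces A's modulo/floor-division digit loop by one str() conversion, len() and a
-- reversing slice (idiomatic; same return value everywhere).

-- ===== PORT A =====
-- termination measure for the while loop (cited by the port's decreasing_by)
theorem pv_floordiv10_lt (num : Int) (h : num > 0) :
    (PySem.Int.floordiv num 10).toNat < num.toNat := by
  simp only [PySem.Int.floordiv, Int.fdiv_eq_ediv]
  omega

-- the while loop; rev is kept as List Char (Python's growing string), packed by String.ofList at return
def get_count_digit_loop (num count : Int) (rev : List Char) : Int × String :=
  if _h : num > 0 then
    let last := PySem.Int.mod num 10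
    get_count_digit_loop (PySem.Int.floordiv num 10) (count + 1)
      (rev ++ PySem.Int.toChars last)
  else (count, String.ofList rev)
termination_by num.toNat
decreasing_by
  exact pv_floordiv10_lt num _h

def get_count_digit (num : Int) : Int × String :=
  get_count_digit_loop num 0 []

-- ===== PORT B =====
def get_count_digit_alt (num : Int) : Int × String :=
  let s : String := if num > 0 then PySem.Int.toStr num else ""
  (PySem.Str.len s, (PySem.Str.slice? s none none (-1)).getD "")

-- ===== PRECONDITION & SPEC =====
def Spec_get_count_digit (num : Int) (out : Int × String) : Prop := out = get_count_digit_alt num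
instance (num : Int) (out : Int × String) : Decidable (Spec_get_count_digit num out) := by unfold Spec_get_count_digit; infer_instance

-- ===== CLAIM (what is proved, stated in full; the proofs are below) =====
def Claim_equal_get_count_digit : Prop := ∀ (num : Int), Dom_get_count_digit num → Spec_get_count_digit num (get_count_digit num)

-- ===== LEMMAS AND PROOFS =====

/-- the digits of `n` in base 10, least significant first (empty for `n = 0`) -/
def revDigs (n : Nat) : List Char :=
  if h : n = 0 then [] else Nat.digitChar (n % 10) :: revDigs (n / 10)
decreasing_by omega

lemma toDigitsCore_eq_revDigs (f : Nat) : ∀ (n : Nat) (ds : List Char), 0 < n → n ≤ f →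
    Nat.toDigitsCore 10 f n ds = (revDigs n).reverse ++ ds := by
  induction f with
  | zero => intro n ds h1 h2; omega
  | succ f ih =>
    intro n ds h1 h2
    rw [revDigs]
    simp only [Nat.toDigitsCore, show ¬ n = 0 by omega, dite_false, List.reverse_cons,
      List.append_assoc, List.cons_append, List.nil_append]
    by_cases h : n / 10 = 0
    · simp [h, revDigs]
    · rw [if_neg h, ih (n / 10) _ (by omega) (by omega)]

lemma toChars_pos (n : Int) (h : 0 < n) :
    PySem.Int.toChars n = (revDigs n.toNat).reverse := by
  rw [PySem.Int.toChars, if_neg (by omega),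
    show Nat.toDigits 10 n.toNat = Nat.toDigitsCore 10 (n.toNat + 1) n.toNat [] from rfl,
    toDigitsCore_eq_revDigs (n.toNat + 1) n.toNat [] (by omega) (by omega), List.append_nil]

lemma toChars_digit (d : Nat) (h : d < 10) :
    PySem.Int.toChars ((d : Nat) : Int) = [Nat.digitChar d] := by
  rcases Nat.eq_zero_or_pos d with h0 | h0
  · subst h0; rfl
  · rw [toChars_pos _ (by omega), Int.toNat_natCast, revDigs,
      dif_neg (by omega), Nat.div_eq_of_lt h, Nat.mod_eq_of_lt h, revDigs]
    rfl

lemma loop_eq (k : Nat) : ∀ (num count : Int) (rev : List Char), num.toNat ≤ k →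
    get_count_digit_loop num count rev =
      (count + ((revDigs num.toNat).length : Int), String.ofList (rev ++ revDigs num.toNat)) := by
  induction k with
  | zero =>
    intro num count rev hk
    rw [get_count_digit_loop.eq_def, dif_neg (by omega), show num.toNat = 0 by omega, revDigs]
    simp
  | succ k ih =>
    intro num count rev hk
    by_cases h : num > 0
    · rw [get_count_digit_loop.eq_def, dif_pos h]
      have hmod : PySem.Int.mod num 10 = ((num.toNat % 10 : Nat) : Int) := by
        simp only [PySem.Int.mod, Int.fmod_eq_emod]; omega
      have hdiv : PySem.Int.floordiv num 10 = ((num.toNat / 10 : Nat) : Int) := by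
        simp only [PySem.Int.floordiv, Int.fdiv_eq_ediv]; omega
      have hrd : revDigs num.toNat
          = Nat.digitChar (num.toNat % 10) :: revDigs (num.toNat / 10) := by
        rw [revDigs, dif_neg (by omega)]
      simp only [hmod, hdiv,
        toChars_digit (num.toNat % 10) (Nat.mod_lt _ (by omega))]
      rw [ih _ _ _ (by simp; omega), Int.toNat_natCast, hrd]
      simp only [List.length_cons, List.append_assoc, List.cons_append, List.nil_append]
      refine Prod.ext ?_ rfl
      push_cast; ring
    · rw [get_count_digit_loop.eq_def, dif_neg h, show num.toNat = 0 by omega, revDigs]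
      simp

-- ===== VERDICT (by name: the statement is the Claim_ definition above) =====
theorem get_count_digit_spec : Claim_equal_get_count_digit := by
  intro num _
  unfold Spec_get_count_digit get_count_digit get_count_digit_alt
  rw [loop_eq num.toNat num 0 [] (le_refl _)]
  by_cases h : num > 0
  · rw [if_pos h]
    simp only [PySem.Str.slice?_none_none_neg_one, PySem.Str.len_eq, PySem.Int.toList_toStr,
      toChars_pos num h, Option.getD_some]
    simp
  · rw [if_neg h, show num.toNat = 0 by omega, revDigs]
    simp
    rfl
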